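-- pv_equiv track=rewrite | github.com/jschmidtnj/interviews | quora/final/q2.py | prefixStrings
-- ===== SOURCE A (Python) =====
-- def prefixStrings(a, b):
--   possible_prefixes = []
--   for i in range(0, len(a)):
--     prefix_string = "".join(a[:i + 1])
--     possible_prefixes.append(prefix_string)
--   for elem in b:
--     if elem not in possible_prefixes:
--       return False
--   return True
-- ===== SOURCE B (Python) =====
-- def prefixStrings(a, b):
--   prefixes = set()
--   cur = ""
--   for s in a:
--     cur += s
--     prefixes.add(cur)
--   return all(elem in prefixes for elem in b)
-- ===== Notes on version B (the rewrite author's own statement) =====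
-- stated objective: faster
-- what changed: Replaces the quadratic rebuild of each prefix via join(a[:i+1]) and the per-element linear list scan with one running concatenation collected into a set that is then probed by hashing.
import Mathlib
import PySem

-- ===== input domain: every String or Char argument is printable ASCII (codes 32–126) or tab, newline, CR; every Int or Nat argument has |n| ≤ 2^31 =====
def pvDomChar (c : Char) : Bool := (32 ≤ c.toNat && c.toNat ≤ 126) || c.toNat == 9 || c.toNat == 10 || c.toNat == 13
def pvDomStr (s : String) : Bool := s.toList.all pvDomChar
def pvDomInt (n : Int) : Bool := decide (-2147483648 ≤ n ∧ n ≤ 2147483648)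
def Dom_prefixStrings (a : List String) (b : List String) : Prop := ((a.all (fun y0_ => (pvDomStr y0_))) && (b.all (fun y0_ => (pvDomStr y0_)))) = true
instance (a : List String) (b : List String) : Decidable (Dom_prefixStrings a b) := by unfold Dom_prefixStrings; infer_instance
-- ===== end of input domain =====

-- B replaces A's quadratic prefix rebuilding (join of a[:i+1] for every i) and linear
-- list-membership scans with one running concatenation collected into a set (objective: faster).

-- ===== PORT A =====
-- the 'for elem in b' loop with its early 'return False'
def pvALoop (possible_prefixes : List String) : List String → Bool
  | [] => true
  | elem :: rest =>
    if possible_prefixes.contains elem then pvALoop possible_prefixes rest else false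

def prefixStrings (a : List String) (b : List String) : Bool :=
  let possible_prefixes :=
    (PySem.List.pyRange 0 (PySem.List.len a) 1).foldl
      (fun acc i => acc ++ [PySem.Str.join "" (PySem.List.slice a none (some (i + 1)))]) []
  pvALoop possible_prefixes b

-- ===== PORT B =====
def prefixStrings_alt (a : List String) (b : List String) : Bool :=
  let st := a.foldl
    (fun (st : PySem.Set String × String) s =>
      let cur := st.2 ++ s
      (st.1.add cur, cur))
    (PySem.Set.empty, "")
  b.all (fun elem => PySem.Set.contains st.1 elem)

-- ===== PRECONDITION & SPEC =====
def Spec_prefixStrings (a : List String) (b : List String) (out : Bool) : Prop := out = prefixStrings_alt a b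
instance (a : List String) (b : List String) (out : Bool) : Decidable (Spec_prefixStrings a b out) := by unfold Spec_prefixStrings; infer_instance

-- ===== CLAIM (what is proved, stated in full; the proofs are below) =====
def Claim_equal_prefixStrings : Prop := ∀ (a : List String) (b : List String), Dom_prefixStrings a b → Spec_prefixStrings a b (prefixStrings a b)

-- ===== LEMMAS AND PROOFS =====

-- "".join is flattening
theorem pvJoinFlat (ps : List (List Char)) : PySem.Chars.join [] ps = ps.flatten := by
  induction ps with
  | nil => rfl
  | cons p ps ih =>
    simp only [PySem.Chars.join, List.intercalate] at ih ⊢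
    cases ps with
    | nil => simp
    | cons q qs => simp_all [List.intersperse]

theorem pvJoinNil : PySem.Str.join "" ([] : List String) = "" := rfl

theorem pvJoinCons (h : String) (l : List String) :
    PySem.Str.join "" (h :: l) = h ++ PySem.Str.join "" l := by
  have he : ("" : String).toList = [] := rfl
  simp only [PySem.Str.join, he, pvJoinFlat, List.map_cons, List.flatten_cons,
    String.ofList_append, String.ofList_toList]

-- A's first loop builds exactly the list of joined prefixes of a
theorem pvAList (a : List String) :
    (PySem.List.pyRange 0 (PySem.List.len a) 1).foldl
      (fun acc i => acc ++ [PySem.Str.join "" (PySem.List.slice a none (some (i + 1)))]) []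
    = (List.range a.length).map (fun k => PySem.Str.join "" (a.take (k + 1))) := by
  rw [PySem.List.pyRange_one]
  simp only [PySem.List.len, Int.sub_zero, Int.toNat_natCast, List.foldl_map]
  rw [PySem.List.foldl_append_singleton_eq_map]
  apply List.map_congr_left
  intro k hk
  have : (0 : Int) + (k : Int) + 1 = ((k + 1 : Nat) : Int) := by push_cast; ring
  rw [this, PySem.List.slice_to_natCast]

-- A's second loop is an 'all' over b
theorem pvALoopAll (p : List String) (b : List String) :
    pvALoop p b = b.all (fun e => p.contains e) := by
  induction b with
  | nil => rfl
  | cons e rest ih =>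
    simp only [pvALoop, List.all_cons, ih]
    cases hpe : p.contains e <;> simp

-- invariant of B's folding loop: membership in the accumulated set
theorem pvBInv (a : List String) (s : PySem.Set String) (cur : String) (x : String) :
    x ∈ (a.foldl
      (fun (st : PySem.Set String × String) s =>
        let cur := st.2 ++ s
        (st.1.add cur, cur)) (s, cur)).1
    ↔ x ∈ s ∨ ∃ k < a.length, x = cur ++ PySem.Str.join "" (a.take (k + 1)) := by
  induction a generalizing s cur with
  | nil => simp
  | cons h t ih =>
    simp only [List.foldl_cons]
    rw [ih]
    simp only [PySem.Set.mem_add, List.length_cons]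
    constructor
    · rintro ((hs | rfl) | ⟨k, hk, rfl⟩)
      · exact Or.inl hs
      · exact Or.inr ⟨0, by omega, by simp [pvJoinCons, pvJoinNil]⟩
      · refine Or.inr ⟨k + 1, by omega, ?_⟩
        simp [List.take_succ_cons, pvJoinCons, String.append_assoc]
    · rintro (hs | ⟨k, hk, rfl⟩)
      · exact Or.inl (Or.inl hs)
      · cases k with
        | zero => exact Or.inl (Or.inr (by simp [pvJoinCons, pvJoinNil]))
        | succ j =>
          refine Or.inr ⟨j, by omega, ?_⟩
          simp [List.take_succ_cons, pvJoinCons, String.append_assoc]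

-- pointwise: A's list membership = B's set membership
theorem pvMemEq (a : List String) (x : String) :
    ((List.range a.length).map (fun k => PySem.Str.join "" (a.take (k + 1)))).contains x
    = PySem.Set.contains
        (a.foldl
          (fun (st : PySem.Set String × String) s =>
            let cur := st.2 ++ s
            (st.1.add cur, cur)) (PySem.Set.empty, "")).1 x := by
  rw [Bool.eq_iff_iff]
  rw [PySem.Set.contains_iff, pvBInv]
  simp [PySem.Set.empty, List.mem_range, eq_comm]

-- ===== VERDICT (by name: the statement is the Claim_ definition above) =====
theorem prefixStrings_spec : Claim_equal_prefixStrings := by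
  intro a b _
  unfold Spec_prefixStrings prefixStrings prefixStrings_alt
  rw [pvAList, pvALoopAll]
  have hf := funext (pvMemEq a)
  rw [hf]
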